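-- pv_equiv track=rewrite | github.com/MrBrantCode/unitest_baseline | mut_generate/mist_train_cf/cf_56853/solution.py | calculate_vowels
-- ===== SOURCE A (Python) =====
-- def calculate_vowels(sentence):
--     vowels = "aeiou"
--     words_dict = {}
--     words = sentence.split()
--
--     for word in words:
--         word_lowered = word.lower()
--         vowels_dict = {vowel: word_lowered.count(vowel) for vowel in vowels}
--         words_dict[word] = vowels_dict
--
--     return words_dict
-- ===== SOURCE B (Python) =====
-- def calculate_vowels(sentence):
--     words_dict = {}
--     for word in sentence.split():
--         counts = {v: 0 for v in "aeiou"}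
--         for c in word.lower():
--             if c in counts:
--                 counts[c] += 1
--         words_dict[word] = counts
--     return words_dict
-- ===== Notes on version B (the rewrite author's own statement) =====
-- stated objective: alternative
-- what changed: Per word, the five separate word_lowered.count(vowel) scans of A's dict comprehension are replaced by one single pass over the word's characters that increments a pre-seeded {a,e,i,o,u} counter dict.
import Mathlib
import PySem

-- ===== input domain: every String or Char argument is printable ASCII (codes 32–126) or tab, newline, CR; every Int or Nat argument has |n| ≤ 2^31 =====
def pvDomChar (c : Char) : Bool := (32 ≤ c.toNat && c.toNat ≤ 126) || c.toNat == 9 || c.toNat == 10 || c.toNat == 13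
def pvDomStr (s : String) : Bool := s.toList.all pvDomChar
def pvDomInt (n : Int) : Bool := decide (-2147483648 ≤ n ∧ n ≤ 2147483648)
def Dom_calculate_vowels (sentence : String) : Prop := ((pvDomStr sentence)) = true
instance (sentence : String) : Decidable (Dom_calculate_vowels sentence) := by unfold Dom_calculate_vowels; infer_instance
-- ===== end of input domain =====

-- B replaces A's five per-word .count() scans by one single pass over the word's characters
-- incrementing a pre-seeded vowel counter dict (objective: alternative decomposition, same cost class).

-- ===== PORT A =====
def calculate_vowels (sentence : String) : List (String × List (String × Int)) :=
  let vowels := "aeiou"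
  let words := PySem.Str.split₀ sentence
  let words_dict :=
    words.foldl (fun (d : PySem.Dict String (List (String × Int))) word =>
      let word_lowered := PySem.Str.lower word
      -- dict comprehension {vowel: word_lowered.count(vowel) for vowel in vowels}
      let vowels_dict :=
        vowels.toList.foldl (fun (vd : PySem.Dict String Int) vowel =>
          vd.insert (String.ofList [vowel]) ((PySem.Str.count word_lowered (String.ofList [vowel]) : Int)))
          PySem.Dict.empty
      d.insert word vowels_dict.items) PySem.Dict.empty
  words_dict.items

-- ===== PORT B =====
def calculate_vowels_alt (sentence : String) : List (String × List (String × Int)) :=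
  let words_dict :=
    (PySem.Str.split₀ sentence).foldl (fun (d : PySem.Dict String (List (String × Int))) word =>
      -- counts = {v: 0 for v in "aeiou"}
      let counts0 :=
        "aeiou".toList.foldl (fun (c : PySem.Dict String Int) v => c.insert (String.ofList [v]) 0)
          PySem.Dict.empty
      -- for c in word.lower(): if c in counts: counts[c] += 1
      let counts :=
        (PySem.Str.lower word).toList.foldl (fun (cd : PySem.Dict String Int) ch =>
          if cd.contains (String.ofList [ch]) then cd.modify (String.ofList [ch]) 0 (· + 1) else cd)
          counts0
      d.insert word counts.items) PySem.Dict.empty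
  words_dict.items

-- ===== PRECONDITION & SPEC =====
def Spec_calculate_vowels (sentence : String) (out : List (String × List (String × Int))) : Prop := out = calculate_vowels_alt sentence
instance (sentence : String) (out : List (String × List (String × Int))) : Decidable (Spec_calculate_vowels sentence out) := by unfold Spec_calculate_vowels; infer_instance

-- ===== CLAIM (what is proved, stated in full; the proofs are below) =====
def Claim_equal_calculate_vowels : Prop := ∀ (sentence : String), Dom_calculate_vowels sentence → Spec_calculate_vowels sentence (calculate_vowels sentence)

-- ===== LEMMAS AND PROOFS =====

-- PySem.Chars.count with a single-character needle is List.count.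
lemma go_singleton (c : Char) : ∀ (fuel : Nat) (l : List Char) (acc : Nat), l.length ≤ fuel →
    PySem.Chars.count.go [c] fuel l acc = acc + l.count c := by
  intro fuel
  induction fuel with
  | zero =>
    intro l acc h
    interval_cases hl : l.length
    · rw [List.length_eq_zero_iff] at hl; subst hl; simp [PySem.Chars.count.go]
  | succ n ih =>
    intro l acc h
    cases l with
    | nil => simp [PySem.Chars.count.go]
    | cons hd t =>
      rw [PySem.Chars.count.go]
      by_cases hc : hd = c
      · subst hc
        simp only [List.isPrefixOf, beq_self_eq_true, Bool.and_self, if_true,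
          List.length_cons, List.length_nil, List.drop_succ_cons, List.drop_zero]
        rw [ih t (acc+1) (by simpa using h)]
        simp
        omega
      · have : ([c].isPrefixOf (hd :: t)) = false := by
          simp only [List.isPrefixOf, Bool.and_true, beq_eq_false_iff_ne, ne_eq]
          intro h'; exact hc h'.symm
        rw [this]
        simp only [Bool.false_eq_true, if_false]
        rw [ih t acc (by simpa using h)]
        simp [hc]

lemma count_singleton (s : List Char) (c : Char) : PySem.Chars.count s [c] = s.count c := by
  rw [PySem.Chars.count]
  simp [go_singleton c s.length s 0 le_rfl]

-- B's guarded single-pass counter loop over an aeiou-seeded dict adds each vowel's count.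
lemma vfold (l : List Char) : ∀ (x1 x2 x3 x4 x5 : Int),
    l.foldl (fun (cd : PySem.Dict String Int) ch =>
        if cd.contains (String.ofList [ch]) then cd.modify (String.ofList [ch]) 0 (· + 1) else cd)
      (PySem.Dict.mk [("a",x1),("e",x2),("i",x3),("o",x4),("u",x5)]) =
    PySem.Dict.mk [("a",x1 + l.count 'a'),("e",x2 + l.count 'e'),("i",x3 + l.count 'i'),
                   ("o",x4 + l.count 'o'),("u",x5 + l.count 'u')] := by
  induction l with
  | nil => simp
  | cons ch t ih =>
    intro x1 x2 x3 x4 x5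
    rw [List.foldl_cons]
    by_cases h1 : ch = 'a'
    · subst h1
      have hs : (if (PySem.Dict.mk [("a",x1),("e",x2),("i",x3),("o",x4),("u",x5)]).contains (String.ofList ['a'])
          then (PySem.Dict.mk [("a",x1),("e",x2),("i",x3),("o",x4),("u",x5)]).modify (String.ofList ['a']) 0 (· + 1)
          else (PySem.Dict.mk [("a",x1),("e",x2),("i",x3),("o",x4),("u",x5)])) =
          PySem.Dict.mk [("a",x1+1),("e",x2),("i",x3),("o",x4),("u",x5)] := by
        simp [PySem.Dict.contains, PySem.Dict.modify, PySem.Dict.insert, PySem.Dict.getD,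
          PySem.Dict.get?, String.ext_iff]
      rw [hs, ih]
      simp
      ring_nf
    by_cases h2 : ch = 'e'
    · subst h2
      have hs : (if (PySem.Dict.mk [("a",x1),("e",x2),("i",x3),("o",x4),("u",x5)]).contains (String.ofList ['e'])
          then (PySem.Dict.mk [("a",x1),("e",x2),("i",x3),("o",x4),("u",x5)]).modify (String.ofList ['e']) 0 (· + 1)
          else (PySem.Dict.mk [("a",x1),("e",x2),("i",x3),("o",x4),("u",x5)])) =
          PySem.Dict.mk [("a",x1),("e",x2+1),("i",x3),("o",x4),("u",x5)] := by
        simp [PySem.Dict.contains, PySem.Dict.modify, PySem.Dict.insert, PySem.Dict.getD,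
          PySem.Dict.get?, String.ext_iff]
      rw [hs, ih]
      simp [h1]
      ring_nf
    by_cases h3 : ch = 'i'
    · subst h3
      have hs : (if (PySem.Dict.mk [("a",x1),("e",x2),("i",x3),("o",x4),("u",x5)]).contains (String.ofList ['i'])
          then (PySem.Dict.mk [("a",x1),("e",x2),("i",x3),("o",x4),("u",x5)]).modify (String.ofList ['i']) 0 (· + 1)
          else (PySem.Dict.mk [("a",x1),("e",x2),("i",x3),("o",x4),("u",x5)])) =
          PySem.Dict.mk [("a",x1),("e",x2),("i",x3+1),("o",x4),("u",x5)] := by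
        simp [PySem.Dict.contains, PySem.Dict.modify, PySem.Dict.insert, PySem.Dict.getD,
          PySem.Dict.get?, String.ext_iff]
      rw [hs, ih]
      simp [h1, h2]
      ring_nf
    by_cases h4 : ch = 'o'
    · subst h4
      have hs : (if (PySem.Dict.mk [("a",x1),("e",x2),("i",x3),("o",x4),("u",x5)]).contains (String.ofList ['o'])
          then (PySem.Dict.mk [("a",x1),("e",x2),("i",x3),("o",x4),("u",x5)]).modify (String.ofList ['o']) 0 (· + 1)
          else (PySem.Dict.mk [("a",x1),("e",x2),("i",x3),("o",x4),("u",x5)])) =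
          PySem.Dict.mk [("a",x1),("e",x2),("i",x3),("o",x4+1),("u",x5)] := by
        simp [PySem.Dict.contains, PySem.Dict.modify, PySem.Dict.insert, PySem.Dict.getD,
          PySem.Dict.get?, String.ext_iff]
      rw [hs, ih]
      simp [h1, h2, h3]
      ring_nf
    by_cases h5 : ch = 'u'
    · subst h5
      have hs : (if (PySem.Dict.mk [("a",x1),("e",x2),("i",x3),("o",x4),("u",x5)]).contains (String.ofList ['u'])
          then (PySem.Dict.mk [("a",x1),("e",x2),("i",x3),("o",x4),("u",x5)]).modify (String.ofList ['u']) 0 (· + 1)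
          else (PySem.Dict.mk [("a",x1),("e",x2),("i",x3),("o",x4),("u",x5)])) =
          PySem.Dict.mk [("a",x1),("e",x2),("i",x3),("o",x4),("u",x5+1)] := by
        simp [PySem.Dict.contains, PySem.Dict.modify, PySem.Dict.insert, PySem.Dict.getD,
          PySem.Dict.get?, String.ext_iff]
      rw [hs, ih]
      simp [h1, h2, h3, h4]
      ring_nf
    · have hc : (PySem.Dict.mk [("a",x1),("e",x2),("i",x3),("o",x4),("u",x5)]).contains (String.ofList [ch]) = false := by
        simp [PySem.Dict.contains, String.ext_iff, Ne.symm h1, Ne.symm h2, Ne.symm h3, Ne.symm h4, Ne.symm h5]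
      rw [hc]
      simp only [Bool.false_eq_true, if_false]
      rw [ih]
      simp [h1, h2, h3, h4, h5]

-- per word: A's five-scan vowel dict equals B's single-pass counter dict (as item lists)
lemma per_word (word : String) :
    ("aeiou".toList.foldl (fun (vd : PySem.Dict String Int) vowel =>
        vd.insert (String.ofList [vowel]) ((PySem.Str.count (PySem.Str.lower word) (String.ofList [vowel]) : Int)))
        PySem.Dict.empty).items =
    ((PySem.Str.lower word).toList.foldl (fun (cd : PySem.Dict String Int) ch =>
        if cd.contains (String.ofList [ch]) then cd.modify (String.ofList [ch]) 0 (· + 1) else cd)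
        ("aeiou".toList.foldl (fun (c : PySem.Dict String Int) v => c.insert (String.ofList [v]) 0)
          PySem.Dict.empty)).items := by
  have hc0 : ("aeiou".toList.foldl (fun (c : PySem.Dict String Int) v => c.insert (String.ofList [v]) 0)
      PySem.Dict.empty) = PySem.Dict.mk [("a",0),("e",0),("i",0),("o",0),("u",0)] := by decide
  rw [hc0, vfold]
  simp only [zero_add]
  simp [PySem.Dict.insert, PySem.Dict.contains, PySem.Dict.empty, String.ext_iff,
    PySem.Str.count_eq, count_singleton]

-- ===== VERDICT (by name: the statement is the Claim_ definition above) =====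
theorem calculate_vowels_spec : Claim_equal_calculate_vowels := by
  intro sentence _
  show calculate_vowels sentence = calculate_vowels_alt sentence
  unfold calculate_vowels calculate_vowels_alt
  have hf : (fun (d : PySem.Dict String (List (String × Int))) word =>
      d.insert word
        (let word_lowered := PySem.Str.lower word
         ("aeiou".toList.foldl (fun (vd : PySem.Dict String Int) vowel =>
            vd.insert (String.ofList [vowel]) ((PySem.Str.count word_lowered (String.ofList [vowel]) : Int)))
            PySem.Dict.empty).items)) =
      (fun (d : PySem.Dict String (List (String × Int))) word =>
      d.insert word
        (let counts0 :=
            "aeiou".toList.foldl (fun (c : PySem.Dict String Int) v => c.insert (String.ofList [v]) 0)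
              PySem.Dict.empty
         ((PySem.Str.lower word).toList.foldl (fun (cd : PySem.Dict String Int) ch =>
            if cd.contains (String.ofList [ch]) then cd.modify (String.ofList [ch]) 0 (· + 1) else cd)
            counts0).items)) := by
    funext d word
    rw [per_word word]
  simp only []
  rw [hf]
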